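-- pv_equiv track=rewrite | github.com/ddesai2411/uml_python | uml_lib/bwFilter.py | isPAYAP
-- ===== SOURCE A (Python) =====
-- def isPAYAP(theLine):
--     retVal = False
--     toks = theLine.split("<AttachmentName>")
--     if len(toks) > 0:
--         for i in range(0,len(toks)):
--             if toks[i][:5] == "PAYAP":
--                 #print "\n", i, ":", toks[i][:20]
--                 retVal = True
--     return retVal
-- ===== SOURCE B (Python) =====
-- def isPAYAP(theLine):
--     return theLine.startswith("PAYAP") or "<AttachmentName>PAYAP" in theLine
-- ===== Notes on version B (the rewrite author's own statement) =====
-- stated objective: simpler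
-- what changed: Replaces the split-into-tokens loop with a flag by two direct substring tests: a token starts with PAYAP exactly when the line itself starts with PAYAP or the delimiter immediately followed by PAYAP occurs in the line.
import Mathlib
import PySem

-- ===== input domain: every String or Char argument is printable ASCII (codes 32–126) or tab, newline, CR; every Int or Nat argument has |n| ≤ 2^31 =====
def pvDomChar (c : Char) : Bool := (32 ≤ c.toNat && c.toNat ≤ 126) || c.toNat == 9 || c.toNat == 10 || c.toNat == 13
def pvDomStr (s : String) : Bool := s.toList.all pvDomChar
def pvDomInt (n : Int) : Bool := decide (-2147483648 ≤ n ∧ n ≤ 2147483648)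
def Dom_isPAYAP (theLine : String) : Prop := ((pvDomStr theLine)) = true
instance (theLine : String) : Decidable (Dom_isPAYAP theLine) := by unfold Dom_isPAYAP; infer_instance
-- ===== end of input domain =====

-- B replaces A's split-into-tokens-and-flag loop by two direct substring tests; objective: simpler.

-- ===== PORT A =====
-- literal port of A: split on "<AttachmentName>", loop i over range(0, len(toks)),
-- set the flag when toks[i][:5] == "PAYAP"
def isPAYAP (theLine : String) : Bool :=
  let retVal := false
  let toks := PySem.Chars.splitOn theLine.toList "<AttachmentName>".toList
  let retVal :=
    if toks.length > 0 then
      (PySem.List.pyRange 0 (toks.length : Int)).foldl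
        (fun r i =>
          if PySem.Chars.slice (PySem.List.pyGetD toks i []) none (some 5) == "PAYAP".toList then
            true
          else r)
        retVal
    else retVal
  retVal

-- ===== PORT B =====
def isPAYAP_alt (theLine : String) : Bool :=
  PySem.Str.startswith theLine "PAYAP" || PySem.Str.isIn "<AttachmentName>PAYAP" theLine

-- ===== PRECONDITION & SPEC =====
def Spec_isPAYAP (theLine : String) (out : Bool) : Prop := out = isPAYAP_alt theLine
instance (theLine : String) (out : Bool) : Decidable (Spec_isPAYAP theLine out) := by unfold Spec_isPAYAP; infer_instance

-- ===== CLAIM (what is proved, stated in full; the proofs are below) =====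
def Claim_equal_isPAYAP : Prop := ∀ (theLine : String), Dom_isPAYAP theLine → Spec_isPAYAP theLine (isPAYAP theLine)

-- ===== LEMMAS AND PROOFS =====

def pvSep : List Char := "<AttachmentName>".toList
def pvP : List Char := "PAYAP".toList
def pvQ (t : List Char) : Bool := pvP.isPrefixOf t

-- unfolding equations of PySem.Chars.splitOn.go (all hold definitionally)
theorem pvGo_zero (sep l cur acc) :
    PySem.Chars.splitOn.go sep 0 l cur acc = ((cur.reverse ++ l) :: acc).reverse := rfl

theorem pvGo_nil (sep : List Char) (fuel : Nat) (cur acc) :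
    PySem.Chars.splitOn.go sep (fuel + 1) [] cur acc = (cur.reverse :: acc).reverse := rfl

theorem pvGo_cons (sep : List Char) (fuel : Nat) (c : Char) (rest cur acc) :
    PySem.Chars.splitOn.go sep (fuel + 1) (c :: rest) cur acc =
      if sep.isPrefixOf (c :: rest) then
        PySem.Chars.splitOn.go sep fuel (List.drop sep.length (c :: rest)) [] (cur.reverse :: acc)
      else
        PySem.Chars.splitOn.go sep fuel rest (c :: cur) acc := rfl

-- the accumulator only collects already-finished tokens in front
theorem pvGo_acc (sep : List Char) : ∀ (fuel : Nat) (l cur : List Char) (acc : List (List Char)),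
    PySem.Chars.splitOn.go sep fuel l cur acc =
      acc.reverse ++ PySem.Chars.splitOn.go sep fuel l cur [] := by
  intro fuel
  induction fuel with
  | zero => intro l cur acc; simp [pvGo_zero]
  | succ fuel ih =>
    intro l cur acc
    cases l with
    | nil => simp [pvGo_nil]
    | cons c rest =>
      rw [pvGo_cons, pvGo_cons]
      split_ifs with h
      · rw [ih _ _ (cur.reverse :: acc), ih _ _ ([cur.reverse])]
        simp
      · exact ih _ _ acc

theorem pvGo_ne_nil (sep : List Char) : ∀ (fuel : Nat) (l cur : List Char),
    PySem.Chars.splitOn.go sep fuel l cur [] ≠ [] := by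
  intro fuel
  induction fuel with
  | zero => intro l cur; simp [pvGo_zero]
  | succ fuel ih =>
    intro l cur
    cases l with
    | nil => simp [pvGo_nil]
    | cons c rest =>
      rw [pvGo_cons]
      split_ifs with h
      · rw [pvGo_acc]; simp
      · exact ih _ _

-- a '<'-free list is a prefix of u ++ '<'::w iff it is a prefix of u
theorem pvPrefix_append_lt (p u w : List Char) (hp : '<' ∉ p) :
    p.isPrefixOf (u ++ '<' :: w) = p.isPrefixOf u := by
  induction u generalizing p with
  | nil =>
    cases p with
    | nil => simp
    | cons a q =>
      simp only [List.nil_append]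
      rw [Bool.eq_iff_iff]
      simp only [List.isPrefixOf_iff_prefix, List.cons_prefix_cons]
      constructor
      · rintro ⟨rfl, -⟩; exact absurd List.mem_cons_self hp
      · rintro h; exact absurd h (by simp)
  | cons b u ih =>
    cases p with
    | nil => simp
    | cons a q =>
      simp only [List.cons_append]
      rw [Bool.eq_iff_iff]
      simp only [List.isPrefixOf_iff_prefix, List.cons_prefix_cons]
      have := ih q (fun h => hp (List.mem_cons_of_mem _ h))
      rw [Bool.eq_iff_iff] at this
      simp only [List.isPrefixOf_iff_prefix] at this
      tauto

-- occurrences of pvSep ++ pvP in pvSep ++ t: either right at the front, or inside t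
theorem pvOcc (t : List Char) :
    PySem.Chars.isIn (pvSep ++ pvP) (pvSep ++ t) =
      (pvP.isPrefixOf t || PySem.Chars.isIn (pvSep ++ pvP) t) := by
  rw [Bool.eq_iff_iff]
  simp only [Bool.or_eq_true, List.isPrefixOf_iff_prefix]
  constructor
  · intro h
    obtain ⟨j, hj⟩ := (PySem.Chars.exists_prefix_drop_iff_isIn _ _).mpr h
    by_cases hj16 : 16 ≤ j
    · right
      have hdrop : List.drop j (pvSep ++ t) = List.drop (j - 16) t := by
        rw [List.drop_append, List.drop_eq_nil_of_le (by simp [pvSep]; omega)]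
        simp [pvSep]
      rw [hdrop] at hj
      exact (PySem.Chars.exists_prefix_drop_iff_isIn _ _).mp ⟨j - 16, hj⟩
    · have hj16' : j < 16 := by omega
      interval_cases j
      · exact Or.inl ((List.prefix_append_right_inj pvSep).mp (by simpa using hj))
      all_goals (exfalso; simp [pvSep, pvP, List.cons_prefix_cons] at hj)
  · rintro (hp | hinf)
    · exact (PySem.Chars.isIn_iff_infix _ _).mpr
        ((List.prefix_append_right_inj pvSep).mpr hp).isInfix
    · rw [PySem.Chars.isIn_iff_infix] at hinf ⊢
      exact hinf.trans (List.suffix_append pvSep t).isInfix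

-- HEAD lemma: a '<'-free p is a prefix of the first token iff it is a prefix of the whole rest
theorem pvHead (n : Nat) : ∀ (l : List Char), l.length ≤ n → ∀ (fuel : Nat) (cur p : List Char),
    l.length < fuel → '<' ∉ p →
    p.isPrefixOf ((PySem.Chars.splitOn.go pvSep fuel l cur []).headI) =
      p.isPrefixOf (cur.reverse ++ l) := by
  induction n with
  | zero =>
    intro l hl fuel cur p hf hp
    have hln : l = [] := List.eq_nil_of_length_eq_zero (Nat.le_zero.mp hl)
    subst hln
    cases fuel with
    | zero => omega
    | succ f => simp [pvGo_nil]
  | succ n ih =>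
    intro l hl fuel cur p hf hp
    cases l with
    | nil =>
      cases fuel with
      | zero => omega
      | succ f => simp [pvGo_nil]
    | cons c rest =>
      cases fuel with
      | zero => omega
      | succ f =>
        rw [pvGo_cons]
        split_ifs with h
        · -- a separator starts here: the current token is finished
          have hc : c = '<' := by
            have hpre := List.isPrefixOf_iff_prefix.mp h
            rw [show pvSep = '<' :: "AttachmentName>".toList from rfl] at hpre
            exact (List.cons_prefix_cons.mp hpre).1.symm
          rw [pvGo_acc]
          simp only [List.reverse_cons, List.reverse_nil, List.nil_append, List.singleton_append,
            List.headI_cons]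
          subst hc
          exact (pvPrefix_append_lt p cur.reverse rest hp).symm
        · have hr : rest.length ≤ n := by simp at hl; omega
          have hfr : rest.length < f := by simp at hf; omega
          rw [ih rest hr f (c :: cur) p hfr hp]
          simp

-- TAIL lemma: some non-first token starts with pvP iff pvSep ++ pvP occurs in the rest
theorem pvTail (n : Nat) : ∀ (l : List Char), l.length ≤ n → ∀ (fuel : Nat) (cur : List Char),
    l.length < fuel →
    ((PySem.Chars.splitOn.go pvSep fuel l cur []).tail).any pvQ =
      PySem.Chars.isIn (pvSep ++ pvP) l := by
  induction n with
  | zero =>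
    intro l hl fuel cur hf
    have hln : l = [] := List.eq_nil_of_length_eq_zero (Nat.le_zero.mp hl)
    subst hln
    cases fuel with
    | zero => omega
    | succ f =>
      have hnilIn : PySem.Chars.isIn (pvSep ++ pvP) [] = false := by decide
      simp [pvGo_nil, hnilIn]
  | succ n ih =>
    intro l hl fuel cur hf
    cases l with
    | nil =>
      cases fuel with
      | zero => omega
      | succ f =>
        have hnilIn : PySem.Chars.isIn (pvSep ++ pvP) [] = false := by decide
        simp [pvGo_nil, hnilIn]
    | cons c rest =>
      cases fuel with
      | zero => omega
      | succ f =>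
        rw [pvGo_cons]
        split_ifs with h
        · -- separator here: l = pvSep ++ l'
          obtain ⟨l', hl'⟩ := List.isPrefixOf_iff_prefix.mp h
          have hlen : (c :: rest).length = 16 + l'.length := by
            rw [← hl']; simp [pvSep]; omega
          have hdrop : List.drop pvSep.length (c :: rest) = l' := by
            rw [← hl', List.drop_left]
          rw [hdrop, pvGo_acc]
          simp only [List.reverse_cons, List.reverse_nil, List.nil_append, List.singleton_append,
            List.tail_cons]
          have hl'n : l'.length ≤ n := by omega
          have hl'f : l'.length < f := by
            have : (c :: rest).length < f + 1 := hf
            omega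
          rcases hG : PySem.Chars.splitOn.go pvSep f l' [] [] with _ | ⟨t0, ts⟩
          · exact absurd hG (pvGo_ne_nil pvSep f l' [])
          · have hhead := pvHead n l' hl'n f [] pvP hl'f (by decide)
            have htail := ih l' hl'n f [] hl'f
            rw [hG] at hhead htail
            simp only [List.headI_cons, List.reverse_nil, List.nil_append] at hhead
            simp only [List.tail_cons] at htail
            rw [List.any_cons]
            show (pvQ t0 || ts.any pvQ) = _
            rw [show pvQ t0 = pvP.isPrefixOf t0 from rfl, hhead, htail, ← hl', pvOcc]
        · have hr : rest.length ≤ n := by simp at hl; omega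
          have hfr : rest.length < f := by simp at hf; omega
          rw [ih rest hr f (c :: cur) hfr]
          -- pvSep ++ pvP is not a prefix of c :: rest since pvSep is not
          rw [Bool.eq_iff_iff, PySem.Chars.isIn_iff_infix, PySem.Chars.isIn_iff_infix,
            List.infix_cons_iff]
          constructor
          · exact Or.inr
          · rintro (hpre | hinf)
            · exact absurd (List.isPrefixOf_iff_prefix.mpr
                ((List.prefix_append pvSep pvP).trans hpre)) h
            · exact hinf

-- some token of the split starts with pvP iff the line starts with pvP or pvSep ++ pvP occurs
theorem pvMain (s : List Char) :
    (PySem.Chars.splitOn s pvSep).any pvQ =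
      (pvP.isPrefixOf s || PySem.Chars.isIn (pvSep ++ pvP) s) := by
  have hsplit : PySem.Chars.splitOn s pvSep =
      PySem.Chars.splitOn.go pvSep (s.length + 1) s [] [] := rfl
  rcases hG : PySem.Chars.splitOn.go pvSep (s.length + 1) s [] [] with _ | ⟨t0, ts⟩
  · exact absurd hG (pvGo_ne_nil pvSep _ s [])
  · have hhead := pvHead s.length s le_rfl (s.length + 1) [] pvP (by omega) (by decide)
    have htail := pvTail s.length s le_rfl (s.length + 1) [] (by omega)
    rw [hG] at hhead htail
    simp only [List.headI_cons, List.reverse_nil, List.nil_append] at hhead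
    simp only [List.tail_cons] at htail
    rw [hsplit, hG, List.any_cons]
    show (pvQ t0 || ts.any pvQ) = _
    rw [show pvQ t0 = pvP.isPrefixOf t0 from rfl, hhead, htail]

-- A's flag loop is an `any`
theorem pvFoldlFlag (f : Int → Bool) : ∀ (L : List Int) (b : Bool),
    L.foldl (fun r i => if f i then true else r) b = (b || L.any f) := by
  intro L
  induction L with
  | nil => intro b; simp
  | cons x xs ih =>
    intro b
    rw [List.foldl_cons, ih, List.any_cons]
    cases hfx : f x <;> simp

-- the index loop over range(0, len(toks)) is an `any` over the tokens
theorem pvRangeAny (toks : List (List Char)) (F : List Char → Bool) :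
    (PySem.List.pyRange 0 (toks.length : Int)).any
        (fun i => F (PySem.List.pyGetD toks i [])) = toks.any F := by
  rw [PySem.List.pyRange_zero_natCast, List.any_map]
  rw [Bool.eq_iff_iff]
  simp only [List.any_eq_true, List.mem_range, Function.comp_apply, PySem.List.pyGetD_natCast]
  constructor
  · rintro ⟨k, hk, hF⟩
    refine ⟨toks[k], List.getElem_mem hk, ?_⟩
    rwa [List.getD_eq_getElem _ _ hk] at hF
  · rintro ⟨x, hx, hF⟩
    obtain ⟨k, hk, rfl⟩ := List.mem_iff_getElem.mp hx
    exact ⟨k, hk, by rwa [List.getD_eq_getElem _ _ hk]⟩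

-- tok[:5] == "PAYAP" tests the prefix
theorem pvSlicePrefix (tok : List Char) :
    (PySem.Chars.slice tok none (some 5) == pvP) = pvQ tok := by
  rw [PySem.Chars.slice_eq_listSlice, PySem.List.slice_to tok (by norm_num)]
  rw [Bool.eq_iff_iff]
  simp only [beq_iff_eq, pvQ, List.isPrefixOf_iff_prefix]
  rw [List.prefix_iff_eq_take]
  constructor
  · intro hv; rw [show pvP.length = 5 from rfl]; exact hv.symm
  · intro hv; rw [show pvP.length = 5 from rfl] at hv; exact hv.symm

-- ===== VERDICT (by name: the statement is the Claim_ definition above) =====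
theorem isPAYAP_spec : Claim_equal_isPAYAP := by
  intro s _
  show isPAYAP s = isPAYAP_alt s
  unfold isPAYAP isPAYAP_alt
  have hsep : "<AttachmentName>".toList = pvSep := rfl
  have hP : "PAYAP".toList = pvP := rfl
  have hSP : "<AttachmentName>PAYAP".toList = pvSep ++ pvP := rfl
  simp only [hsep, hP]
  have hne : PySem.Chars.splitOn s.toList pvSep ≠ [] := by
    show PySem.Chars.splitOn.go pvSep (s.toList.length + 1) s.toList [] [] ≠ []
    exact pvGo_ne_nil pvSep _ _ []
  rw [if_pos (by cases h : PySem.Chars.splitOn s.toList pvSep with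
        | nil => exact absurd h hne
        | cons a b => simp)]
  rw [pvFoldlFlag, Bool.false_or]
  rw [pvRangeAny _ (fun tok => PySem.Chars.slice tok none (some 5) == pvP)]
  simp only [pvSlicePrefix]
  rw [pvMain]
  rw [PySem.Str.startswith_eq, PySem.Str.isIn_eq, hSP, hP]
  rfl
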